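-- pv_equiv track=rewrite | github.com/prvnlhr/PYTHON_DSA | Data Structure/Stacks and Queues/28. Maximum of all subarrays of size k.py | maximumofAll
-- ===== SOURCE A (Python) =====
-- from collections import deque
--
-- def maximumofAll(arr, k):
--     n = len(arr)
--
--     Q = deque()  # Dequeue for two way popping elements
--
--     res = [-1] * (n - k + 1)  # maintaining res for all sub-array of size k
--     res_index = 0  # index for storing res in res array
--
--     # NOTE:: we are putting index i to queue to not actual value
--     for i in range(n):  # for ele in arr loop
--
--         # 1. if ele in queue is out of curr window ,just pop it
--         if Q and Q[0] <= i - k: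
--             Q.popleft()
--
--         # 2. if ele in queue is smaller then curr arr[i] ,just pop it
--         while Q and arr[Q[-1]] <= arr[i]:
--             Q.pop()
--         # else put it in queue
--         Q.append(i)
--
--         # if we reached our window size we will have our ele at Q[0]
--         if i >= k - 1:
--             res[res_index] = arr[Q[0]]
--             res_index += 1
--
--     return res
-- ===== SOURCE B (Python) =====
-- def maximumofAll(arr, k):
--     # Each window of size k is just a slice; take its max directly.
--     return [max(arr[i:i + k]) for i in range(len(arr) - k + 1)]
-- ===== Notes on version B (the rewrite author's own statement) =====
-- stated objective: simpler
-- what changed: Replaces the deque-of-indices sliding-window machinery and the preallocated result array with a one-line comprehension taking max of each window slice directly.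
-- outside the precondition, e.g. on maximumofAll([5], 0): A returns [5, -1], B raises ValueError; on maximumofAll([1, 2], -1): A returns [1, 2, -1, -1], B raises ValueError
import Mathlib
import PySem

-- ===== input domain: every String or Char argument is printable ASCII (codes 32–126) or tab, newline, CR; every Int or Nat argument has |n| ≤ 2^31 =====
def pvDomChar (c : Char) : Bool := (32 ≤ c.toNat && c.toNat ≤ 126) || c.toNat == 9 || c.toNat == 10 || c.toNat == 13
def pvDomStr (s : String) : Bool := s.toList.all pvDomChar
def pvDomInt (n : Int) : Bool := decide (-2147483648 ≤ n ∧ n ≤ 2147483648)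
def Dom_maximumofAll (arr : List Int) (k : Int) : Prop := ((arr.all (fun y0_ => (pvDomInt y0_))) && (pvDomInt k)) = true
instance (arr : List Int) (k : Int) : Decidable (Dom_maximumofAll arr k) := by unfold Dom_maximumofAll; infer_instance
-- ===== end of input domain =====

-- B replaces A's deque-of-indices sliding-window machinery with a direct max over each
-- window slice: simpler (one comprehension), not faster.

-- ===== PORT A =====
-- the 'while Q and arr[Q[-1]] <= arr[i]: Q.pop()' loop
def popSmaller (arr : List Int) (ai : Int) : List Int → List Int
  | [] => []
  | q :: qs =>
      if PySem.List.pyGetD arr (PySem.List.pyGetD (q :: qs) (-1) 0) 0 ≤ ai then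
        popSmaller arr ai (q :: qs).dropLast
      else q :: qs
  termination_by Q => Q.length
  decreasing_by simp

def stepA (arr : List Int) (k : Int) (st : List Int × List Int × Int) (i : Int) :
    List Int × List Int × Int :=
  let Q := st.1
  let Q1 := if Q ≠ [] ∧ PySem.List.pyGetD Q 0 0 ≤ i - k then Q.tail else Q
  let Q2 := popSmaller arr (PySem.List.pyGetD arr i 0) Q1
  let Q3 := Q2 ++ [i]
  if i ≥ k - 1 then
    (Q3, PySem.List.pySetD st.2.1 st.2.2 (PySem.List.pyGetD arr (PySem.List.pyGetD Q3 0 0) 0),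
      st.2.2 + 1)
  else (Q3, st.2.1, st.2.2)

def maximumofAll (arr : List Int) (k : Int) : List Int :=
  let n : Int := arr.length
  let res := PySem.List.pyRepeat [(-1 : Int)] (n - k + 1)
  ((PySem.List.pyRange 0 n 1).foldl (stepA arr k) ([], res, 0)).2.1

-- ===== PORT B =====
-- max(arr[i:i+k]); .getD 0 is exact: under Pre_ (1 ≤ k) every window slice is nonempty
def maximumofAll_alt (arr : List Int) (k : Int) : List Int :=
  (PySem.List.pyRange 0 ((arr.length : Int) - k + 1) 1).map
    (fun i => (PySem.List.max? (PySem.List.slice arr (some i) (some (i + k))) (fun x => x)).getD 0)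

-- ===== PRECONDITION & SPEC =====
-- Pre_ excludes k ≤ 0, where A returns a list padded with its leftover -1 sentinels
-- (an artefact of its preallocated result array) while B's max() of an empty window
-- slice raises ValueError.
def Pre_maximumofAll (arr : List Int) (k : Int) : Prop := 1 ≤ k
instance (arr : List Int) (k : Int) : Decidable (Pre_maximumofAll arr k) := by
  unfold Pre_maximumofAll; infer_instance

def pvWitness_maximumofAll : List Int × Int := ([2, 7, 1, 5, 5], 2)

def Spec_maximumofAll (arr : List Int) (k : Int) (out : List Int) : Prop := out = maximumofAll_alt arr k
instance (arr : List Int) (k : Int) (out : List Int) : Decidable (Spec_maximumofAll arr k out) := by unfold Spec_maximumofAll; infer_instance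

-- ===== CLAIM (what is proved, stated in full; the proofs are below) =====
def Claim_equal_maximumofAll : Prop := ∀ (arr : List Int) (k : Int), Dom_maximumofAll arr k → Pre_maximumofAll arr k → Spec_maximumofAll arr k (maximumofAll arr k)

-- ===== LEMMAS AND PROOFS =====

lemma popSmaller_ne_nil (arr : List Int) (ai : Int) (Q : List Int) (h : Q ≠ []) :
    popSmaller arr ai Q = if PySem.List.pyGetD arr (PySem.List.pyGetD Q (-1) 0) 0 ≤ ai then
      popSmaller arr ai Q.dropLast else Q := by
  match Q with
  | [] => exact absurd rfl h
  | q :: qs => rw [popSmaller]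

lemma popSmaller_eq_filter (arr : List Int) (ai : Int) (Q : List Int)
    (h : Q.Pairwise (fun x y => PySem.List.pyGetD arr y 0 < PySem.List.pyGetD arr x 0)) :
    popSmaller arr ai Q = Q.filter (fun q => decide (ai < PySem.List.pyGetD arr q 0)) := by
  induction Q using List.reverseRecOn with
  | nil => rw [popSmaller]; rfl
  | append_singleton l x ih =>
    have hpair := h
    rw [List.pairwise_append] at hpair
    rw [popSmaller_ne_nil arr ai _ (by simp), PySem.List.pyGetD_neg_one_append_singleton,
      List.dropLast_concat]
    by_cases hx : PySem.List.pyGetD arr x 0 ≤ ai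
    · rw [if_pos hx, ih (h.sublist (by simp)), List.filter_append]
      simp [Int.not_lt.mpr hx]
    · rw [if_neg hx, List.filter_append]
      have hall : ∀ q ∈ l, decide (ai < PySem.List.pyGetD arr q 0) = true := by
        intro q hq
        have := hpair.2.2 q hq x (by simp)
        simp; omega
      rw [List.filter_eq_self.mpr hall]
      simp [Int.not_le.mp hx]


def good (arr : List Int) (K i j : Nat) : Bool :=
  decide (i < j + K) &&
  (List.range (i + 1)).all (fun m => decide (j < m → arr.getD m 0 < arr.getD j 0))

def qlist (arr : List Int) (K i : Nat) : List Nat := (List.range (i + 1)).filter (good arr K i)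

def outv (arr : List Int) (K i : Nat) : Int := arr.getD ((qlist arr K i).headD 0) 0

lemma good_iff (arr : List Int) (K i j : Nat) :
    good arr K i j = true ↔ i < j + K ∧ ∀ m, m ≤ i → j < m → arr.getD m 0 < arr.getD j 0 := by
  simp only [good, Bool.and_eq_true, List.all_eq_true, List.mem_range, decide_eq_true_eq,
    Nat.lt_succ_iff]

lemma good_self (arr : List Int) (K i : Nat) (hK : 1 ≤ K) : good arr K i i = true := by
  rw [good_iff]; exact ⟨by omega, by intro m h1 h2; omega⟩

lemma mem_qlist (arr : List Int) (K i j : Nat) :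
    j ∈ qlist arr K i ↔ j ≤ i ∧ good arr K i j = true := by
  simp [qlist, List.mem_filter]

lemma qlist_ne_nil (arr : List Int) (K i : Nat) (hK : 1 ≤ K) : qlist arr K i ≠ [] :=
  List.ne_nil_of_mem ((mem_qlist arr K i i).mpr ⟨le_refl i, good_self arr K i hK⟩)

lemma qlist_pairwise (arr : List Int) (K i : Nat) : (qlist arr K i).Pairwise (· < ·) :=
  (List.pairwise_lt_range).filter _

lemma headD_mem {α : Type} [Inhabited α] (l : List α) (h : l ≠ []) : l.headD default ∈ l := by
  match l with
  | x :: xs => simp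

lemma head_mem_qlist (arr : List Int) (K i : Nat) (hK : 1 ≤ K) :
    (qlist arr K i).headD 0 ∈ qlist arr K i := headD_mem _ (qlist_ne_nil arr K i hK)

lemma headD_le_of_mem (l : List Nat) (hp : l.Pairwise (· < ·)) (j : Nat) (hj : j ∈ l) :
    l.headD 0 ≤ j := by
  match l with
  | x :: xs =>
    simp only [List.headD_cons]
    rcases List.mem_cons.mp hj with h | h
    · omega
    · exact le_of_lt (List.rel_of_pairwise_cons hp h)

-- every index of the window [i+1-K, i] is ≤ the value at the deque head
lemma window_le_head (arr : List Int) (K : Nat) (hK : 1 ≤ K) (t : Nat) :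
    ∀ d j, t - j ≤ d → t < j + K → j ≤ t →
      arr.getD j 0 ≤ arr.getD ((qlist arr K t).headD 0) 0 := by
  intro d
  induction d with
  | zero =>
    intro j hd h1 h2
    have hg : good arr K t j = true := by
      have hj : j = t := by omega
      rw [hj]; exact good_self arr K t hK
    have hjmem : j ∈ qlist arr K t := (mem_qlist arr K t j).mpr ⟨h2, hg⟩
    have hle := headD_le_of_mem _ (qlist_pairwise arr K t) j hjmem
    rcases Nat.lt_or_ge ((qlist arr K t).headD 0) j with hlt | hge
    · have hgh := ((mem_qlist arr K t _).mp (head_mem_qlist arr K t hK)).2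
      rw [good_iff] at hgh
      exact le_of_lt (hgh.2 j h2 hlt)
    · have : (qlist arr K t).headD 0 = j := by omega
      rw [this]
  | succ d ih =>
    intro j hd h1 h2
    by_cases hg : good arr K t j = true
    · -- j is in the deque; the head is ≤ j and dominates it (or equals it)
      have hjmem : j ∈ qlist arr K t := (mem_qlist arr K t j).mpr ⟨h2, hg⟩
      have hle := headD_le_of_mem _ (qlist_pairwise arr K t) j hjmem
      rcases Nat.lt_or_ge ((qlist arr K t).headD 0) j with hlt | hge
      · have hgh := ((mem_qlist arr K t _).mp (head_mem_qlist arr K t hK)).2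
        rw [good_iff] at hgh
        exact le_of_lt (hgh.2 j h2 hlt)
      · have : (qlist arr K t).headD 0 = j := by omega
        rw [this]
    · -- j was popped: some later m in the window has arr[m] ≥ arr[j]
      rw [good_iff] at hg
      push Not at hg
      obtain ⟨m, hm1, hm2, hm3⟩ := hg h1
      exact le_trans hm3 (ih m (by omega) (by omega) hm1)

-- the value A stores for the window starting at w equals B's max of the window slice
lemma outv_eq_max (arr : List Int) (K : Nat) (hK : 1 ≤ K) (w : Nat) (hw : w + K ≤ arr.length) :
    (PySem.List.max? (PySem.List.slice arr (some (w : Int)) (some ((w : Int) + (K : Int))))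
        (fun x => x)).getD 0 = outv arr K (w + K - 1) := by
  rw [PySem.List.slice_natCast_add]
  set s := (arr.drop w).take K with hs
  have hsl : s.length = K := by simp [hs]; omega
  have hget : ∀ u, (hu : u < K) → s[u]'(by omega) = arr.getD (w + u) 0 := by
    intro u hu
    have hlt : u + w < arr.length := by omega
    simp [hs, List.getD_eq_getElem?_getD, Nat.add_comm w u, List.getElem?_eq_getElem hlt]
  have hne : s ≠ [] := by
    intro h; rw [h] at hsl; simp at hsl; omega
  obtain ⟨M, hM⟩ : ∃ M, PySem.List.max? s (fun x => x) = some M := by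
    cases h : PySem.List.max? s (fun x => x) with
    | none => exact absurd ((PySem.List.max?_eq_none_iff s (fun x => x)).mp h) hne
    | some M => exact ⟨M, rfl⟩
  rw [hM, Option.getD_some]
  set t := w + K - 1 with ht
  set h := (qlist arr K t).headD 0 with hh
  -- h lies in the window [w, t]
  have hgh' := (mem_qlist arr K t _).mp (head_mem_qlist arr K t hK)
  have hgh := hgh'.2
  have hhw : w ≤ h ∧ h ≤ t := by
    have h1 := hgh'.1
    rw [good_iff] at hgh
    omega
  -- arr[h] is in the slice, hence ≤ M
  have hle1 : arr.getD h 0 ≤ M := by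
    have hmem : arr.getD h 0 ∈ s := by
      have hm := List.getElem_mem (l := s) (n := h - w) (h := by rw [hsl]; omega)
      rw [hget (h - w) (by omega)] at hm
      have hwh : w + (h - w) = h := by omega
      rwa [hwh] at hm
    have := PySem.List.max?_isMax hM _ hmem
    simpa using this
  -- M is an element of the window, hence ≤ arr[h] by the head-dominance lemma
  have hle2 : M ≤ arr.getD h 0 := by
    have hmem := PySem.List.max?_mem hM
    obtain ⟨u, hu, hMu⟩ := List.mem_iff_getElem.mp hmem
    rw [hsl] at hu
    rw [← hMu, hget u hu]
    exact window_le_head arr K hK t t (w + u) (by omega) (by omega) (by omega)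
  have : M = arr.getD h 0 := le_antisymm hle2 hle1
  rw [this, outv]

-- the deque contents at the top of iteration t (before any popping)
def qstate (arr : List Int) (K : Nat) : Nat → List Int
  | 0 => []
  | s + 1 => (qlist arr K s).map (fun j => Int.ofNat j)

-- deque membership right after the popleft of iteration t
def pm (arr : List Int) (K t j : Nat) : Bool := good arr K (t - 1) j && decide (t < j + K)

lemma popleft_step (arr : List Int) (K : Nat) (hK : 1 ≤ K) (t : Nat) :
    (if qstate arr K t ≠ [] ∧ PySem.List.pyGetD (qstate arr K t) 0 0 ≤ (t : Int) - (K : Int)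
      then (qstate arr K t).tail else qstate arr K t)
    = ((List.range t).filter (pm arr K t)).map (fun j => Int.ofNat j) := by
  match t with
  | 0 => simp [qstate]
  | s + 1 =>
    by_cases hc : K ≤ s + 1 ∧ good arr K s (s + 1 - K) = true
    · obtain ⟨hc1, hc2⟩ := hc
      set j0 := s + 1 - K with hj0
      have hkey : (List.range (s+1)).filter (good arr K s)
          = j0 :: (List.range (s+1)).filter (pm arr K (s+1)) := by
        have hsplit : List.range (s+1) = List.range' 0 j0 ++ List.range' j0 K := by
          rw [List.range_eq_range', show s + 1 = j0 + K from by omega,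
            ← List.range'_append (step := 1)]
          norm_num
        have hnil1 : (List.range' 0 j0).filter (good arr K s) = [] := by
          rw [List.filter_eq_nil_iff]
          intro j hj
          rw [List.mem_range'_1] at hj
          intro hcon
          rw [good_iff] at hcon
          omega
        have hnil2 : (List.range' 0 (j0+1)).filter (pm arr K (s+1)) = [] := by
          rw [List.filter_eq_nil_iff]
          intro j hj
          rw [List.mem_range'_1] at hj
          simp only [pm, Bool.and_eq_true, decide_eq_true_eq, not_and]
          intro _
          omega
        have hsplit2 : List.range (s+1) = List.range' 0 (j0+1) ++ List.range' (j0+1) (K-1) := by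
          rw [List.range_eq_range', show s + 1 = (j0 + 1) + (K - 1) from by omega,
            ← List.range'_append (step := 1)]
          norm_num
        have hr : List.range' j0 K = j0 :: List.range' (j0 + 1) (K - 1) := by
          conv_lhs => rw [show K = (K - 1) + 1 from by omega]
          rw [List.range'_succ]
        conv_lhs => rw [hsplit]
        rw [List.filter_append, hnil1, List.nil_append, hr,
          List.filter_cons_of_pos (by exact hc2)]
        congr 1
        conv_rhs => rw [hsplit2]
        rw [List.filter_append, hnil2, List.nil_append]
        apply List.filter_congr
        intro j hj
        rw [List.mem_range'_1] at hj
        have hd : decide (s + 1 < j + K) = true := by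
          simp only [decide_eq_true_eq]; omega
        simp [pm, hd]
      have hq : qstate arr K (s+1)
          = ((List.range (s+1)).filter (good arr K s)).map (fun j => Int.ofNat j) := rfl
      have hcond : ((Int.ofNat j0 :: ((List.range (s+1)).filter (pm arr K (s+1))).map
            (fun j => Int.ofNat j)) ≠ []) ∧
          PySem.List.pyGetD (Int.ofNat j0 :: ((List.range (s+1)).filter (pm arr K (s+1))).map
            (fun j => Int.ofNat j)) 0 0 ≤ ((s + 1 : Nat) : Int) - (K : Int) := by
        refine ⟨by simp, ?_⟩
        rw [PySem.List.pyGetD_zero_cons]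
        simp only [Int.ofNat_eq_natCast]
        omega
      rw [hq, hkey, List.map_cons, if_pos hcond, List.tail_cons]
    · have heq : (List.range (s+1)).filter (good arr K s)
          = (List.range (s+1)).filter (pm arr K (s+1)) := by
        apply List.filter_congr
        intro j hj
        rw [List.mem_range] at hj
        cases hgj : good arr K s j with
        | false => simp [pm, hgj]
        | true =>
          have hlt : s + 1 < j + K := by
            have hg := (good_iff arr K s j).mp hgj
            rcases Nat.lt_or_ge (s+1) (j + K) with h | h
            · exact h
            · exfalso
              apply hc
              refine ⟨by omega, ?_⟩
              have hjj : s + 1 - K = j := by omega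
              rw [hjj]; exact hgj
          simp [pm, hgj, hlt]
      have hq : qstate arr K (s+1)
          = ((List.range (s+1)).filter (good arr K s)).map (fun j => Int.ofNat j) := rfl
      rw [hq, heq]
      set l := (List.range (s+1)).filter (pm arr K (s+1)) with hl
      rw [if_neg]
      rintro ⟨hne, hle⟩
      have hlne : l ≠ [] := by
        intro h
        exact hne (by rw [h, List.map_nil])
      obtain ⟨j1, rest, hcons⟩ := List.exists_cons_of_ne_nil hlne
      have hj1 : j1 ∈ l := by rw [hcons]; simp
      rw [hl, List.mem_filter] at hj1
      have hpm := hj1.2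
      simp only [pm, Bool.and_eq_true, decide_eq_true_eq] at hpm
      rw [hcons] at hle
      simp only [List.map_cons, PySem.List.pyGetD_zero_cons, Int.ofNat_eq_natCast] at hle
      omega

lemma dequeFull_step (arr : List Int) (K : Nat) (hK : 1 ≤ K) (t : Nat) :
    popSmaller arr (PySem.List.pyGetD arr (t : Int) 0)
        (((List.range t).filter (pm arr K t)).map (fun j => Int.ofNat j)) ++ [(t : Int)]
      = qstate arr K (t + 1) := by
  have hpair : (((List.range t).filter (pm arr K t)).map (fun j => Int.ofNat j)).Pairwise
      (fun x y => PySem.List.pyGetD arr y 0 < PySem.List.pyGetD arr x 0) := by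
    rw [List.pairwise_map]
    have h0 : ((List.range t).filter (pm arr K t)).Pairwise (· < ·) :=
      List.pairwise_lt_range.filter _
    rw [List.Pairwise.and_mem] at h0
    refine h0.imp ?_
    rintro a b ⟨ha, hb, hab⟩
    rw [List.mem_filter, List.mem_range] at ha hb
    have hga : good arr K (t - 1) a = true := by
      have := ha.2
      simp only [pm, Bool.and_eq_true] at this
      exact this.1
    rw [good_iff] at hga
    have := hga.2 b (by omega) hab
    simp only [Int.ofNat_eq_natCast, PySem.List.pyGetD_natCast]
    simpa using this
  rw [popSmaller_eq_filter _ _ _ hpair, List.filter_map, List.filter_filter]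
  have hcongr : ∀ j ∈ List.range t,
      (((fun q => decide (PySem.List.pyGetD arr (t : Int) 0 < PySem.List.pyGetD arr q 0)) ∘
          (fun j => Int.ofNat j)) j && pm arr K t j) = good arr K t j := by
    intro j hj
    rw [List.mem_range] at hj
    simp only [Function.comp_apply, Int.ofNat_eq_natCast, PySem.List.pyGetD_natCast,
      pm, List.getD_eq_getElem?_getD]
    rw [Bool.eq_iff_iff]
    simp only [Bool.and_eq_true, decide_eq_true_eq, good_iff, List.getD_eq_getElem?_getD]
    constructor
    · rintro ⟨hlt, ⟨hw, hdom⟩, hwin⟩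
      refine ⟨hwin, ?_⟩
      intro m hm hjm
      rcases Nat.lt_or_ge m t with h | h
      · exact hdom m (by omega) hjm
      · have : m = t := by omega
        rw [this]; exact hlt
    · rintro ⟨hwin, hdom⟩
      exact ⟨hdom t (le_refl t) hj, ⟨by omega, fun m hm hjm => hdom m (by omega) hjm⟩, hwin⟩
  rw [List.filter_congr hcongr]
  have : qstate arr K (t + 1) = ((List.range (t+1)).filter (good arr K t)).map
      (fun j => Int.ofNat j) := rfl
  rw [this, List.range_succ, List.filter_append, List.map_append,
    List.filter_cons_of_pos (good_self arr K t hK)]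
  simp

def resAt (arr : List Int) (K t : Nat) : List Int :=
  ((List.range (t + 1 - K)).map (fun w => outv arr K (w + K - 1))) ++
    List.replicate ((arr.length + 1 - K) - (t + 1 - K)) (-1)

lemma step_full (arr : List Int) (K : Nat) (hK : 1 ≤ K) (t : Nat) (ht : t < arr.length) :
    stepA arr (K : Int) (qstate arr K t, resAt arr K t, ((t + 1 - K : Nat) : Int)) ((t : Nat) : Int)
      = (qstate arr K (t + 1), resAt arr K (t + 1), ((t + 2 - K : Nat) : Int)) := by
  have hpop := popleft_step arr K hK t
  have hdq := dequeFull_step arr K hK t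
  simp only [stepA]
  rw [hpop, hdq]
  by_cases hKt : K ≤ t + 1
  · rw [if_pos (by omega)]
    -- the stored value is outv arr K t
    obtain ⟨h0, rest, hcons⟩ := List.exists_cons_of_ne_nil (qlist_ne_nil arr K t hK)
    have hv : PySem.List.pyGetD arr (PySem.List.pyGetD (qstate arr K (t+1)) 0 0) 0
        = outv arr K t := by
      have : qstate arr K (t + 1) = (qlist arr K t).map (fun j => Int.ofNat j) := rfl
      rw [this, hcons, List.map_cons, PySem.List.pyGetD_zero_cons, outv, hcons]
      simp [Int.ofNat_eq_natCast, List.getD_eq_getElem?_getD]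
    rw [hv]
    refine Prod.ext rfl (Prod.ext ?_ ?_)
    · -- the res array update
      show PySem.List.pySetD (resAt arr K t) ((t + 1 - K : Nat) : Int) (outv arr K t)
          = resAt arr K (t + 1)
      rw [PySem.List.pySetD_natCast, resAt, resAt]
      have hlen : ((List.range (t + 1 - K)).map (fun w => outv arr K (w + K - 1))).length
          = t + 1 - K := by simp
      rw [List.set_append, if_neg (by omega), hlen]
      have hrep : (arr.length + 1 - K) - (t + 1 - K) = ((arr.length + 1 - K) - (t + 2 - K)) + 1 := by
        omega
      rw [hrep, List.replicate_succ, Nat.sub_self, List.set_cons_zero]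
      rw [show t + 2 - K = (t + 1 - K) + 1 from by omega, List.range_succ, List.map_append]
      rw [List.append_assoc]
      congr 2
      · show outv arr K t = outv arr K (t + 1 - K + K - 1)
        rw [show t + 1 - K + K - 1 = t from by omega]
    · show ((t + 1 - K : Nat) : Int) + 1 = ((t + 2 - K : Nat) : Int)
      omega
  · rw [if_neg (by omega)]
    refine Prod.ext rfl (Prod.ext ?_ ?_)
    · show resAt arr K t = resAt arr K (t + 1)
      rw [resAt, resAt, show t + 1 - K = 0 from by omega, show t + 2 - K = 0 from by omega]
    · show ((t + 1 - K : Nat) : Int) = ((t + 2 - K : Nat) : Int)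
      omega

lemma fold_inv (arr : List Int) (K : Nat) (hK : 1 ≤ K) (t : Nat) (ht : t ≤ arr.length) :
    ((List.range t).map (fun j => Int.ofNat j)).foldl (stepA arr (K : Int))
        ([], List.replicate (arr.length + 1 - K) (-1), 0)
      = (qstate arr K t, resAt arr K t, ((t + 1 - K : Nat) : Int)) := by
  induction t with
  | zero =>
    simp [qstate, resAt, show 1 - K = 0 from by omega]
  | succ t ih =>
    rw [List.range_succ, List.map_append, List.foldl_append, ih (by omega)]
    simp only [List.map_cons, List.map_nil, List.foldl_cons, List.foldl_nil]
    exact step_full arr K hK t (by omega)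
lemma ports_agree (arr : List Int) (k : Int) (hpre : 1 ≤ k) :
    maximumofAll arr k = maximumofAll_alt arr k := by
  set K := k.toNat with hKdef
  have hk : k = (K : Int) := by omega
  have hK : 1 ≤ K := by omega
  have hW : ((arr.length : Int) - k + 1).toNat = arr.length + 1 - K := by omega
  -- A's side: run the loop invariant to the end
  have hA : maximumofAll arr k
      = (List.range (arr.length + 1 - K)).map (fun w => outv arr K (w + K - 1)) := by
    rw [maximumofAll]
    rw [PySem.List.pyRepeat_singleton, hW, hk, PySem.List.pyRange_zero_nat]
    rw [show (fun k => ((k : Nat) : Int)) = (fun j => Int.ofNat j) from rfl]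
    rw [fold_inv arr K hK arr.length (le_refl _)]
    rw [resAt, Nat.sub_self, List.replicate_zero, List.append_nil]
  -- B's side: it is the same map
  rw [hA, maximumofAll_alt, PySem.List.pyRange_one]
  rw [show ((arr.length : Int) - k + 1 - 0) = ((arr.length : Int) - k + 1) from by ring, hW]
  rw [List.map_map]
  apply List.map_congr_left
  intro w hw
  rw [List.mem_range] at hw
  have hwK : w + K ≤ arr.length := by omega
  have := outv_eq_max arr K hK w hwK
  simp only [Function.comp_apply, zero_add, hk]
  rw [← this]

-- ===== VERDICT (by name: the statement is the Claim_ definition above) =====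
theorem maximumofAll_spec : Claim_equal_maximumofAll := by
  intro arr k _ hpre
  unfold Spec_maximumofAll
  exact ports_agree arr k hpre
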